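-- pv_equiv track=rewrite | github.com/SUwonglab/arcsv | arcsv/sv_output_convert.py | svelter_string_to_path
-- ===== SOURCE A (Python) =====
-- def svelter_string_to_path(string, nblocks):
--     path = [0, 1]
--     i = 0
--     while i < len(string):
--         b = 1 + (ord(string[i]) - ord('a'))
--         is_reverse = (i < len(string) - 1) and string[i+1] == '^'
--         if is_reverse:
--             path.extend([2*b + 1, 2*b])
--         else:
--             path.extend([2*b, 2*b + 1])
--         if is_reverse:
--             i += 2
--         else:
--             i += 1
--     path.extend([2 * (nblocks-1), 2 * (nblocks-1) + 1])
--     return tuple(path)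
-- ===== SOURCE B (Python) =====
-- import re
--
-- def svelter_string_to_path(string, nblocks):
--     tokens = re.findall(r'[\s\S]\^?', string)
--     path = [0, 1]
--     for tok in tokens:
--         b = 1 + ord(tok[0]) - ord('a')
--         if len(tok) == 2:
--             path.extend([2*b + 1, 2*b])
--         else:
--             path.extend([2*b, 2*b + 1])
--     path.extend([2 * (nblocks-1), 2 * (nblocks-1) + 1])
--     return tuple(path)
-- ===== Notes on version B (the rewrite author's own statement) =====
-- stated objective: alternative
-- what changed: B first tokenizes the string into letter-plus-optional-caret units with a regex (re.findall(r'[\s\S]\^?', string)) and then emits each unit's pair in a simple loop, replacing A's inline index lookahead with variable step increments.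
import Mathlib
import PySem

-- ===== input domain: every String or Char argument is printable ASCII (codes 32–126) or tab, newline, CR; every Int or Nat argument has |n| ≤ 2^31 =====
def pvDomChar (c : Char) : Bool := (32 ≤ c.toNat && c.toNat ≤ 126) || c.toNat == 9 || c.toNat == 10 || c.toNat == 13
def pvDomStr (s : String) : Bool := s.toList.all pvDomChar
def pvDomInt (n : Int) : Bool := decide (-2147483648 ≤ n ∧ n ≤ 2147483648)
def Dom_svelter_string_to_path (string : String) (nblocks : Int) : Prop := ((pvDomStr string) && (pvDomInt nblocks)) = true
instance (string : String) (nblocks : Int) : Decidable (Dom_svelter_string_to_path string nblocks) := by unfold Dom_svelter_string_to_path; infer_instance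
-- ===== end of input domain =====

-- B tokenizes the string into letter-plus-optional-caret units first and emits each unit's
-- pair by a flat map, instead of A's inline index lookahead with a variable increment (objective: alternative decomposition).

-- ===== PORT A =====
-- A's while loop over index i, carried as the remaining suffix of the char list;
-- 'string[i+1] == "^"' is the head of the suffix's tail, 'i += 2' drops one more char.
def pvLoopA : List Char → List Int → List Int
  | [], path => path
  | c :: rest, path =>
    let b : Int := 1 + ((c.toNat : Int) - ('a'.toNat : Int))
    let is_reverse := rest.head? = some '^'
    if is_reverse then pvLoopA (rest.drop 1) (path ++ [2*b + 1, 2*b])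
    else pvLoopA rest (path ++ [2*b, 2*b + 1])
  termination_by cs _ => cs.length
  decreasing_by
  · simp
  · simp

def svelter_string_to_path (string : String) (nblocks : Int) : List Int :=
  pvLoopA string.toList [0, 1] ++ [2 * (nblocks - 1), 2 * (nblocks - 1) + 1]

-- ===== PORT B =====
-- Source B's re.findall(r'[\s\S]\^?', string): greedy one char plus optional trailing caret.
def pvTokenize : List Char → List (Char × Bool)
  | [] => []
  | [c] => [(c, false)]
  | c :: d :: rest =>
    if d = '^' then (c, true) :: pvTokenize rest
    else (c, false) :: pvTokenize (d :: rest)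

def pvEmit (t : Char × Bool) : List Int :=
  let b : Int := 1 + ((t.1.toNat : Int) - ('a'.toNat : Int))
  if t.2 then [2*b + 1, 2*b] else [2*b, 2*b + 1]

def svelter_string_to_path_alt (string : String) (nblocks : Int) : List Int :=
  [0, 1] ++ (pvTokenize string.toList).flatMap pvEmit
    ++ [2 * (nblocks - 1), 2 * (nblocks - 1) + 1]

-- ===== PRECONDITION & SPEC =====
def Spec_svelter_string_to_path (string : String) (nblocks : Int) (out : List Int) : Prop := out = svelter_string_to_path_alt string nblocks
instance (string : String) (nblocks : Int) (out : List Int) : Decidable (Spec_svelter_string_to_path string nblocks out) := by unfold Spec_svelter_string_to_path; infer_instance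

-- ===== CLAIM (what is proved, stated in full; the proofs are below) =====
def Claim_equal_svelter_string_to_path : Prop := ∀ (string : String) (nblocks : Int), Dom_svelter_string_to_path string nblocks → Spec_svelter_string_to_path string nblocks (svelter_string_to_path string nblocks)

-- ===== LEMMAS AND PROOFS =====
theorem pvLoopA_eq (cs : List Char) (path : List Int) :
    pvLoopA cs path = path ++ (pvTokenize cs).flatMap pvEmit := by
  induction cs using pvTokenize.induct generalizing path with
  | case1 => simp [pvLoopA, pvTokenize]
  | case2 c => simp [pvLoopA, pvTokenize, pvEmit]
  | case3 c rest ih =>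
    simp [pvLoopA, pvTokenize, pvEmit, ih]
  | case4 c d rest h ih =>
    simp [pvLoopA, pvTokenize, pvEmit, ih, h]

-- ===== VERDICT (by name: the statement is the Claim_ definition above) =====
theorem svelter_string_to_path_spec : Claim_equal_svelter_string_to_path := by
  intro s n _
  unfold Spec_svelter_string_to_path svelter_string_to_path svelter_string_to_path_alt
  rw [pvLoopA_eq]
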